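-- pv_equiv track=rewrite | github.com/baranskixx/agh-ust-algorithms-and-data-structures | 21-22/egz1/zad_a/egz1a.py | snow
-- ===== SOURCE A (Python) =====
-- def snow( S ):
--     S = sorted(S, reverse=True)
--     result = 0
--     for i, s in enumerate(S):
--         if s <= i:
--             break
--         result += s - i
--
--     return result
-- ===== SOURCE B (Python) =====
-- def snow(S):
--     T = sorted(S, reverse=True)
--     # T[i] - i is strictly decreasing, so the contributing elements form a prefix;
--     # binary-search for its length k = first index with T[i] <= i.
--     lo, hi = 0, len(T)
--     while lo < hi:
--         mid = (lo + hi) // 2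
--         if T[mid] <= mid:
--             hi = mid
--         else:
--             lo = mid + 1
--     return sum(T[:lo]) - lo * (lo - 1) // 2
-- ===== Notes on version B (the rewrite author's own statement) =====
-- stated objective: alternative
-- what changed: Replaces the per-element accumulation loop with a break by a binary search for the length k of the contributing prefix (T[i]-i is strictly decreasing on the descending sort), returning sum(T[:k]) minus the closed form k*(k-1)//2.
import Mathlib
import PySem

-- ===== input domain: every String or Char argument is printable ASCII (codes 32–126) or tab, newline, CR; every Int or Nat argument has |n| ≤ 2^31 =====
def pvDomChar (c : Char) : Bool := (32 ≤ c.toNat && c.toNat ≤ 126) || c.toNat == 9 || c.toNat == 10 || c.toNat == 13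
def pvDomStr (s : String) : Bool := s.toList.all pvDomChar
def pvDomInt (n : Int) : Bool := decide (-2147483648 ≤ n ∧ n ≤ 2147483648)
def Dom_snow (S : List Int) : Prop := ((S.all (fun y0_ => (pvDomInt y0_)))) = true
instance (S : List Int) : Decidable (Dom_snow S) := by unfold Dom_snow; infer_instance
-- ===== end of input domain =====

-- B replaces A's accumulation loop by a binary search for the contributing-prefix
-- length plus a closed-form index sum; same O(n log n) cost, different structure.

-- ===== PORT A =====
-- the 'for i, s in enumerate(S): if s <= i: break; result += s - i' loop
def snowLoop : List Int → Int → Int → Int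
  | [], _, acc => acc
  | s :: rest, i, acc => if s ≤ i then acc else snowLoop rest (i + 1) (acc + (s - i))

def snow (S : List Int) : Int :=
  snowLoop (PySem.List.sorted S (fun x => x) true) 0 0

-- ===== PORT B =====
-- the 'while lo < hi' binary search of Source B
def snowSearch (T : List Int) (lo hi : Nat) : Nat :=
  if lo < hi then
    let mid := (lo + hi) / 2
    if T.getD mid 0 ≤ (mid : Int) then snowSearch T lo mid
    else snowSearch T (mid + 1) hi
  else lo
termination_by hi - lo
decreasing_by all_goals omega

def snow_alt (S : List Int) : Int :=
  let T := PySem.List.sorted S (fun x => x) true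
  let k := snowSearch T 0 T.length
  (T.take k).sum - PySem.Int.floordiv ((k : Int) * ((k : Int) - 1)) 2

-- ===== PRECONDITION & SPEC =====
def Spec_snow (S : List Int) (out : Int) : Prop := out = snow_alt S
instance (S : List Int) (out : Int) : Decidable (Spec_snow S out) := by unfold Spec_snow; infer_instance

-- ===== CLAIM (what is proved, stated in full; the proofs are below) =====
def Claim_equal_snow : Prop := ∀ (S : List Int), Dom_snow S → Spec_snow S (snow S)

-- ===== LEMMAS AND PROOFS =====

-- monotonicity of the halting predicate on a descending-sorted list
lemma snow_mono (T : List Int) (hT : T.Pairwise (fun a b => b ≤ a))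
    (i j : Nat) (hij : i ≤ j) (hj : j < T.length)
    (hi : T.getD i 0 ≤ (i : Int)) : T.getD j 0 ≤ (j : Int) := by
  rcases Nat.lt_or_ge i j with h | h
  · have hlt : i < T.length := lt_trans h hj
    have hrel : T[j] ≤ T[i] := (List.pairwise_iff_getElem.mp hT) i j hlt hj h
    rw [List.getD_eq_getElem T 0 hj]
    rw [List.getD_eq_getElem T 0 hlt] at hi
    have : (i : Int) ≤ (j : Int) := by exact_mod_cast hij
    omega
  · have : i = j := le_antisymm hij h
    subst this; exact hi

lemma snowSearch_spec (T : List Int)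
    (hmono : ∀ i j, i ≤ j → j < T.length → T.getD i 0 ≤ (i : Int) → T.getD j 0 ≤ (j : Int)) :
    ∀ (fuel lo hi : Nat), hi - lo ≤ fuel → lo ≤ hi → hi ≤ T.length →
    (∀ j < lo, ¬ (T.getD j 0 ≤ (j : Int))) →
    (∀ j, hi ≤ j → j < T.length → T.getD j 0 ≤ (j : Int)) →
    (∀ j < snowSearch T lo hi, ¬ (T.getD j 0 ≤ (j : Int))) ∧
      (∀ j, snowSearch T lo hi ≤ j → j < T.length → T.getD j 0 ≤ (j : Int)) ∧
      snowSearch T lo hi ≤ T.length := by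
  intro fuel
  induction fuel with
  | zero =>
      intro lo hi hf hlh hhn hlow hhigh
      have : lo = hi := by omega
      subst this
      rw [snowSearch]; simp only [lt_irrefl, if_false]
      exact ⟨hlow, hhigh, le_trans hlh hhn⟩
  | succ f ih =>
      intro lo hi hf hlh hhn hlow hhigh
      rw [snowSearch]
      by_cases hlt : lo < hi
      · simp only [hlt, if_true]
        set mid := (lo + hi) / 2 with hmid
        have hmlt : mid < hi := by omega
        have hmge : lo ≤ mid := by omega
        by_cases hp : T.getD mid 0 ≤ (mid : Int)
        · simp only [hp, if_true]
          exact ih lo mid (by omega) hmge (le_trans (le_of_lt hmlt) hhn) hlow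
            (fun j hj hjn => hmono mid j hj hjn hp)
        · simp only [hp, if_false]
          refine ih (mid + 1) hi (by omega) (by omega) hhn ?_ hhigh
          intro j hj hPj
          rcases Nat.lt_or_ge j lo with h | h
          · exact hlow j h hPj
          · exact hp (hmono j mid (by omega) (lt_of_lt_of_le hmlt hhn) hPj)
      · simp only [hlt, if_false]
        have : lo = hi := by omega
        subst this
        exact ⟨hlow, hhigh, le_trans hlh hhn⟩

lemma snowLoop_eq (T : List Int) (k : Nat) (hk : k ≤ T.length)
    (h1 : ∀ j < k, ¬ (T.getD j 0 ≤ (j : Int)))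
    (h2 : ∀ j, k ≤ j → j < T.length → T.getD j 0 ≤ (j : Int)) :
    ∀ (m i : Nat) (acc : Int), i ≤ k → k - i = m →
    snowLoop (T.drop i) (i : Int) acc = acc + ∑ j ∈ Finset.Ico i k, (T.getD j 0 - (j : Int)) := by
  intro m
  induction m with
  | zero =>
      intro i acc hik hm
      have hik' : i = k := by omega
      subst hik'
      rw [Finset.Ico_self, Finset.sum_empty, add_zero]
      rcases Nat.lt_or_ge i T.length with h | h
      · rw [List.drop_eq_getElem_cons h, snowLoop]
        have : T.getD i 0 ≤ (i : Int) := h2 i le_rfl h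
        rw [List.getD_eq_getElem T 0 h] at this
        simp [this]
      · rw [List.drop_eq_nil_of_le h, snowLoop]
  | succ m ih =>
      intro i acc hik hm
      have hilt : i < k := by omega
      have hin : i < T.length := lt_of_lt_of_le hilt hk
      rw [List.drop_eq_getElem_cons hin, snowLoop]
      have hni : ¬ (T.getD i 0 ≤ (i : Int)) := h1 i hilt
      rw [List.getD_eq_getElem T 0 hin] at hni
      simp only [hni, if_false]
      have hcast : (i : Int) + 1 = ((i + 1 : Nat) : Int) := by push_cast; ring
      rw [hcast, ih (i + 1) (acc + (T[i] - (i : Int))) (by omega) (by omega)]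
      rw [Finset.sum_eq_sum_Ico_succ_bot hilt]
      rw [List.getD_eq_getElem T 0 hin]
      ring

lemma take_sum_eq (T : List Int) :
    ∀ k, k ≤ T.length → (T.take k).sum = ∑ j ∈ Finset.range k, T.getD j 0 := by
  intro k
  induction k with
  | zero => intro _; simp
  | succ k ih =>
      intro hk
      have hkn : k < T.length := by omega
      rw [List.take_add_one, List.sum_append, ih (le_of_lt hkn), Finset.sum_range_succ]
      simp [List.getElem?_eq_getElem hkn]

lemma gauss_floordiv (k : Nat) :
    PySem.Int.floordiv ((k : Int) * ((k : Int) - 1)) 2 = ∑ j ∈ Finset.range k, (j : Int) := by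
  have h2 : (∑ j ∈ Finset.range k, (j : Int)) * 2 = (k : Int) * ((k : Int) - 1) := by
    induction k with
    | zero => simp
    | succ k ih => rw [Finset.sum_range_succ, add_mul, ih]; push_cast; ring
  rw [← h2]
  unfold PySem.Int.floordiv
  exact Int.mul_fdiv_cancel _ (by norm_num)

-- ===== VERDICT (by name: the statement is the Claim_ definition above) =====
theorem snow_spec : Claim_equal_snow := by
  intro S _
  unfold Spec_snow snow snow_alt
  set T := PySem.List.sorted S (fun x => x) true with hT
  set k := snowSearch T 0 T.length with hk
  have hT' : T.Pairwise (fun a b => b ≤ a) := by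
    have := PySem.List.sorted_pairwise_rev (xs := S) (key := fun x => x)
    simpa [hT] using this
  obtain ⟨h1, h2, hkn⟩ := snowSearch_spec T (snow_mono T hT') T.length 0 T.length
    (by omega) (Nat.zero_le _) le_rfl (by omega) (by omega)
  rw [← hk] at h1 h2 hkn
  have hloop := snowLoop_eq T k hkn h1 h2 (k - 0) 0 0 (Nat.zero_le _) rfl
  simp only [List.drop_zero, Nat.cast_zero, zero_add] at hloop
  rw [hloop]
  show ∑ j ∈ Finset.Ico 0 k, (T.getD j 0 - (j : Int)) =
    (T.take k).sum - PySem.Int.floordiv ((k : Int) * ((k : Int) - 1)) 2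
  rw [take_sum_eq T k hkn, gauss_floordiv k]
  rw [Finset.sum_Ico_eq_sum_range]
  simp [Finset.sum_sub_distrib]
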